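-- pv_equiv track=rewrite | github.com/annieLognCoding/A1 | day7.py | contains_xyz
-- ===== SOURCE A (Python) =====
-- def contains_xyz(s):
--     count = 0
--     i = 0
--     while i < len(s) - 2:
--         if s[i:i+3] == 'xyz':
--             if i == 0 or s[i-1] != '.':
--                 count += 1
--         i += 1
--     return count
-- ===== SOURCE B (Python) =====
-- def contains_xyz(s):
--     # 'xyz' cannot overlap itself, so s.count('xyz') is the number of all
--     # starting positions of 'xyz'; s.count('.xyz') is the number of those
--     # immediately preceded by '.', so the difference counts the rest.
--     return s.count('xyz') - s.count('.xyz')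
-- ===== Notes on version B (the rewrite author's own statement) =====
-- stated objective: faster
-- what changed: Replaced the explicit Python-level index loop with window slicing and a preceding-character test by a closed form over the built-in substring counter: count of the pattern minus count of the dot-prefixed pattern.
import Mathlib
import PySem

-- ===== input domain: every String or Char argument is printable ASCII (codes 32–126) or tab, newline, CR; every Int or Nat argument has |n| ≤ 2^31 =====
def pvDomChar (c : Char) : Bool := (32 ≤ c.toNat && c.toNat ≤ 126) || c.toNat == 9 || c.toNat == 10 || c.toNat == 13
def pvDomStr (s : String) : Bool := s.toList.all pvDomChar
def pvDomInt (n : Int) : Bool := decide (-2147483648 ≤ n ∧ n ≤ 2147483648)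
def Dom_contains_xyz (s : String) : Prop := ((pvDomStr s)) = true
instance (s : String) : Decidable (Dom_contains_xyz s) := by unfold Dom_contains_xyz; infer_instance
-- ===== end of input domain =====

-- B replaces A's index loop by the closed form s.count('xyz') - s.count('.xyz') (measured faster at a timing run's sizes).

-- ===== PORT A =====
-- the while loop of A: i increases by 1 until i < len(s) - 2 fails
def containsXyzGo (s : String) (count i : Int) : Int :=
  if _h : i < PySem.Str.len s - 2 then
    containsXyzGo s
      (if PySem.Str.slice s (some i) (some (i + 3)) = "xyz" then
        (if i = 0 ∨ PySem.Str.pyGet? s (i - 1) ≠ some '.' then count + 1 else count)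
      else count)
      (i + 1)
  else count
termination_by (PySem.Str.len s - 2 - i).toNat
decreasing_by omega

def contains_xyz (s : String) : Int := containsXyzGo s 0 0

-- ===== PORT B =====
def contains_xyz_alt (s : String) : Int :=
  (PySem.Str.count s "xyz" : Int) - (PySem.Str.count s ".xyz" : Int)

-- ===== PRECONDITION & SPEC =====
def Spec_contains_xyz (s : String) (out : Int) : Prop := out = contains_xyz_alt s
instance (s : String) (out : Int) : Decidable (Spec_contains_xyz s out) := by unfold Spec_contains_xyz; infer_instance

-- ===== CLAIM (what is proved, stated in full; the proofs are below) =====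
def Claim_equal_contains_xyz : Prop := ∀ (s : String), Dom_contains_xyz s → Spec_contains_xyz s (contains_xyz s)

-- ===== LEMMAS AND PROOFS =====

-- number of positions at which ['x','y','z'] occurs in l
def occ3 : List Char → Int
  | [] => 0
  | c :: t => (if ['x','y','z'] <+: (c :: t) then (1:Int) else 0) + occ3 t

-- number of positions at which ['.','x','y','z'] occurs in l
def occ4 : List Char → Int
  | [] => 0
  | c :: t => (if ['.','x','y','z'] <+: (c :: t) then (1:Int) else 0) + occ4 t

-- A-style count parameterised by the previous character (none at position 0)
def gcnt : List Char → Option Char → Int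
  | [], _ => 0
  | c :: t, p =>
      (if (['x','y','z'] <+: (c :: t)) ∧ p ≠ some '.' then (1:Int) else 0) + gcnt t (some c)

lemma gcnt_short (l : List Char) (p : Option Char) (h : l.length ≤ 2) : gcnt l p = 0 := by
  match l with
  | [] => simp [gcnt]
  | [a] => simp [gcnt, List.prefix_iff_eq_take]
  | [a, b] => simp [gcnt, List.prefix_iff_eq_take]
  | a :: b :: c :: t => simp at h

-- the greedy non-overlapping count of 'xyz' counts every occurrence ('xyz' has no self-overlap)
lemma countGo_xyz (fuel : Nat) : ∀ (l : List Char) (acc : Nat), l.length ≤ fuel →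
    (PySem.Chars.count.go ['x','y','z'] fuel l acc : Int) = acc + occ3 l := by
  induction fuel with
  | zero =>
    intro l acc h
    have : l = [] := List.eq_nil_of_length_eq_zero (Nat.le_zero.mp h)
    subst this
    simp [PySem.Chars.count.go, occ3]
  | succ f ih =>
    intro l acc h
    match l with
    | [] => simp [PySem.Chars.count.go, occ3]
    | c :: t =>
      by_cases hp : ['x','y','z'] <+: (c :: t)
      · obtain ⟨r, hr⟩ := hp
        obtain ⟨hc, ht⟩ : c = 'x' ∧ t = 'y' :: 'z' :: r := by
          simpa [List.cons.injEq, eq_comm] using hr.symm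
        subst hc; subst ht
        have hgo : PySem.Chars.count.go ['x','y','z'] (f+1) ('x'::'y'::'z'::r) acc
            = PySem.Chars.count.go ['x','y','z'] f r (acc + 1) := by
          simp [PySem.Chars.count.go, List.isPrefixOf]
        rw [hgo, ih r (acc+1) (by simp at h; omega)]
        simp [occ3, List.cons_prefix_cons]
        ring
      · have hgo : PySem.Chars.count.go ['x','y','z'] (f+1) (c::t) acc
            = PySem.Chars.count.go ['x','y','z'] f t acc := by
          have : ['x','y','z'].isPrefixOf (c :: t) = false := by
            rw [← Bool.not_eq_true, List.isPrefixOf_iff_prefix]; exact hp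
          simp [PySem.Chars.count.go, this]
        rw [hgo, ih t acc (by simp at h; omega)]
        simp [occ3, hp]
  
-- same for '.xyz' (no self-overlap either)
lemma countGo_dotxyz (fuel : Nat) : ∀ (l : List Char) (acc : Nat), l.length ≤ fuel →
    (PySem.Chars.count.go ['.','x','y','z'] fuel l acc : Int) = acc + occ4 l := by
  induction fuel with
  | zero =>
    intro l acc h
    have : l = [] := List.eq_nil_of_length_eq_zero (Nat.le_zero.mp h)
    subst this
    simp [PySem.Chars.count.go, occ4]
  | succ f ih =>
    intro l acc h
    match l with
    | [] => simp [PySem.Chars.count.go, occ4]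
    | c :: t =>
      by_cases hp : ['.','x','y','z'] <+: (c :: t)
      · obtain ⟨r, hr⟩ := hp
        obtain ⟨hc, ht⟩ : c = '.' ∧ t = 'x' :: 'y' :: 'z' :: r := by
          simpa [List.cons.injEq, eq_comm] using hr.symm
        subst hc; subst ht
        have hgo : PySem.Chars.count.go ['.','x','y','z'] (f+1) ('.'::'x'::'y'::'z'::r) acc
            = PySem.Chars.count.go ['.','x','y','z'] f r (acc + 1) := by
          simp [PySem.Chars.count.go, List.isPrefixOf]
        rw [hgo, ih r (acc+1) (by simp at h; omega)]
        simp [occ4, List.cons_prefix_cons]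
        ring
      · have hgo : PySem.Chars.count.go ['.','x','y','z'] (f+1) (c::t) acc
            = PySem.Chars.count.go ['.','x','y','z'] f t acc := by
          have : ['.','x','y','z'].isPrefixOf (c :: t) = false := by
            rw [← Bool.not_eq_true, List.isPrefixOf_iff_prefix]; exact hp
          simp [PySem.Chars.count.go, this]
        rw [hgo, ih t acc (by simp at h; omega)]
        simp [occ4, hp]

-- the two occurrence counters determine gcnt
lemma gcnt_eq : ∀ (l : List Char) (p : Option Char),
    gcnt l p = occ3 l - occ4 l - (if p = some '.' ∧ (['x','y','z'] <+: l) then (1:Int) else 0)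
  | [], p => by simp [gcnt, occ3, occ4]
  | c :: t, p => by
    have ih := gcnt_eq t (some c)
    have h4 : (['.','x','y','z'] <+: c :: t) ↔ (c = '.' ∧ ['x','y','z'] <+: t) := by
      rw [List.cons_prefix_cons]
      constructor <;> rintro ⟨h1, h2⟩ <;> exact ⟨h1.symm, h2⟩
    simp only [gcnt, occ3, occ4, ih, h4, Option.some.injEq]
    split_ifs <;> first | omega | tauto

-- A's loop computes gcnt of the remaining suffix
lemma containsXyzGo_eq (s : String) (count i : Int) (hi : 0 ≤ i) :
    containsXyzGo s count i =
      count + gcnt (s.toList.drop i.toNat)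
        (if i = 0 then none else s.toList[i.toNat - 1]?) := by
  obtain ⟨k, rfl⟩ : ∃ k : ℕ, i = (k : Int) := ⟨i.toNat, by omega⟩
  rw [containsXyzGo.eq_def]
  split
  case isTrue h =>
    have hlen : PySem.Str.len s = (s.toList.length : Int) := by simp
    have hk : k + 2 < s.toList.length := by rw [hlen] at h; omega
    have hkl : k < s.toList.length := by omega
    have hdrop := List.drop_eq_getElem_cons hkl
    have hslice : (PySem.Str.slice s (some (k : Int)) (some ((k : Int) + 3)) = "xyz")
        ↔ (['x','y','z'] <+: s.toList.drop k) := by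
      rw [← String.toList_inj, PySem.Str.toList_slice, PySem.Chars.slice_eq_listSlice]
      have h3 : ((k : Int) + 3) = ((k + 3 : Nat) : Int) := by push_cast; ring
      rw [h3, PySem.List.slice_natCast]
      have h3' : k + 3 - k = 3 := by omega
      rw [h3', show ("xyz" : String).toList = ['x','y','z'] from by decide]
      constructor
      · intro hE
        exact List.prefix_iff_eq_take.mpr (by simp [hE])
      · intro hE
        rw [List.prefix_iff_eq_take] at hE
        simpa using hE.symm
    have hprev : ((k : Int) = 0 ∨ PySem.Str.pyGet? s ((k : Int) - 1) ≠ some '.')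
        ↔ ((if (k : Int) = 0 then (none : Option Char) else s.toList[k - 1]?) ≠ some '.') := by
      rcases Nat.eq_zero_or_pos k with hk0 | hk0
      · subst hk0; simp
      · have hne : ¬ ((k : Int) = 0) := by omega
        have h1 : ((k : Int) - 1) = ((k - 1 : Nat) : Int) := by omega
        rw [if_neg hne, h1, PySem.Str.pyGet?_natCast]
        exact or_iff_right hne
    rw [containsXyzGo_eq s _ ((k : Int) + 1) (by omega)]
    have hk1 : ((k : Int) + 1).toNat = k + 1 := by omega
    have hne1 : ¬ ((k : Int) + 1 = 0) := by omega
    rw [if_neg hne1, hk1]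
    simp only [Nat.add_sub_cancel, Int.toNat_natCast]
    rw [List.getElem?_eq_getElem hkl, hdrop]
    simp only [gcnt, ← hdrop]
    by_cases hS : ['x','y','z'] <+: s.toList.drop k
    · rw [if_pos (hslice.mpr hS)]
      by_cases hP : (if (k : Int) = 0 then (none : Option Char) else s.toList[k - 1]?) ≠ some '.'
      · rw [if_pos (hprev.mpr hP), if_pos ⟨hS, hP⟩]; ring
      · rw [if_neg (fun hc => hP (hprev.mp hc)), if_neg (fun hc => hP hc.2)]; ring
    · rw [if_neg (fun hc => hS (hslice.mp hc)), if_neg (fun hc => hS hc.1)]; ring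
  case isFalse h =>
    have hlen : PySem.Str.len s = (s.toList.length : Int) := by simp
    rw [hlen] at h
    have hshort : (s.toList.drop (↑k : Int).toNat).length ≤ 2 := by
      simp only [Int.toNat_natCast, List.length_drop]; omega
    rw [gcnt_short _ _ hshort]
    ring
termination_by ((PySem.Str.len s - 2 - i).toNat)
decreasing_by simp at *; omega

-- ===== VERDICT (by name: the statement is the Claim_ definition above) =====
theorem contains_xyz_spec : Claim_equal_contains_xyz := by
  intro s _
  unfold Spec_contains_xyz contains_xyz contains_xyz_alt
  rw [containsXyzGo_eq s 0 0 le_rfl]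
  norm_num
  rw [gcnt_eq]
  have hnone : ¬ ((none : Option Char) = some '.' ∧ (['x','y','z'] <+: s.toList)) := by simp
  rw [if_neg hnone]
  unfold PySem.Chars.count
  have e1 : ("xyz" : String).toList = ['x','y','z'] := by decide
  have e2 : (".xyz" : String).toList = ['.','x','y','z'] := by decide
  simp only [e1, e2, List.isEmpty_cons, Bool.false_eq_true, if_false]
  rw [countGo_xyz s.toList.length s.toList 0 le_rfl,
    countGo_dotxyz s.toList.length s.toList 0 le_rfl]
  push_cast
  ring
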